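-- pv_equiv track=rewrite | github.com/lowkeyshift/rockitchef | single_thread_crawler/runner.py | process_pos
-- ===== SOURCE A (Python) =====
-- MAPPER = {}
--
-- def order_array(array):
--   holder = []
--   temp = {'pos' : None, 'array':[]}
--   for instance in array:
--     if instance[1] != temp['pos']:
--       holder.append(temp)
--       temp = {'pos' : instance[1], 'array':[instance[0]]}
--     else:
--       temp['array'].append(instance[0])
--   holder.append(temp)
--   return holder[1:]
--
-- def process_pos(array):
--   if len(array) == 1:
--     return None, array[0][0]
--   if len(array) == 2:
--     return array[0][0], array[1][0]
--   else:
--     pos_pieces = order_array(array)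
--     cds = pos_pieces[0]['array']
--     first_non_number_word = pos_pieces[1]['array'][0]
--     quantity = None
--     if first_non_number_word in MAPPER:
--       quantity = ' '.join(cds + [first_non_number_word])
--       item_parts = pos_pieces[1]['array'][1:]
--       for rest in pos_pieces[2:]:
--         item_parts += rest['array']
--     else:
--       quantity = ' '.join(cds)
--       item_parts = []
--       for rest in pos_pieces[1:]:
--         item_parts += rest['array']
--     return quantity, ' '.join(item_parts)
-- ===== SOURCE B (Python) =====
-- MAPPER = {}
--
-- def process_pos(array):
--   if len(array) == 1:
--     return None, array[0][0]
--   if len(array) == 2: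
--     return array[0][0], array[1][0]
--   # boundary scan: length of the leading run of tokens sharing array[0]'s position
--   pos0 = array[0][1]
--   L = 0
--   while L < len(array) and array[L][1] == pos0:
--     L += 1
--   words = [w for w, _ in array]
--   cds = words[:L]
--   rest = words[L:]
--   if rest[0] in MAPPER:
--     return ' '.join(cds + [rest[0]]), ' '.join(rest[1:])
--   return ' '.join(cds), ' '.join(rest)
-- ===== Notes on version B (the rewrite author's own statement) =====
-- stated objective: simpler
-- what changed: B replaces A's full grouping pass (order_array building a list of position-groups with a dummy sentinel group, then re-concatenating all tail groups) by a single boundary scan that finds the length L of the leading run of equal positions and splits the word list into words[:L] and words[L:].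
import Mathlib
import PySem

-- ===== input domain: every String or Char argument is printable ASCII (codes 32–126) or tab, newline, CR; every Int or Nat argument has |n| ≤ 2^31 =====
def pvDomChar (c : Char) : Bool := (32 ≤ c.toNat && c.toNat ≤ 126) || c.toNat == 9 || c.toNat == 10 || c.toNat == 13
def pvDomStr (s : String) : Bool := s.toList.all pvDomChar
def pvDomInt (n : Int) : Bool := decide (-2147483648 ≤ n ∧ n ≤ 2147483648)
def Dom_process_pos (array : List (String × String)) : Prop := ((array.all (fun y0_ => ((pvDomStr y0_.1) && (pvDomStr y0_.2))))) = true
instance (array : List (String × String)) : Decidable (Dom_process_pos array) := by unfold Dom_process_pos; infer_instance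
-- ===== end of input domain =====

-- B replaces A's full grouping pass by a single boundary scan splitting the word list
-- at the end of the leading run of equal positions (objective: simpler).

-- ===== PORT A =====
def MAPPER : PySem.Dict String String := PySem.Dict.empty

-- port of order_array: groups are (pos, words) pairs; Python's initial dummy pos None → Option String
def order_array (array : List (String × String)) :
    List (Option String × List String) :=
  let st := array.foldl
    (fun (st : List (Option String × List String) × (Option String × List String)) inst =>
      let holder := st.1
      let temp := st.2
      if some inst.2 ≠ temp.1 then
        (holder ++ [temp], (some inst.2, [inst.1]))
      else
        (holder, (temp.1, temp.2 ++ [inst.1])))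
    ([], (none, []))
  (st.1 ++ [st.2]).drop 1

def process_pos (array : List (String × String)) : Option String × String :=
  if array.length = 1 then
    (none, (array.headI).1)
  else if array.length = 2 then
    (some (array.headI).1, ((array.drop 1).headI).1)
  else
    let pos_pieces := order_array array
    let cds := (pos_pieces.headI).2
    let first_non_number_word := (((pos_pieces.drop 1).headI).2).headI
    if MAPPER.contains first_non_number_word then
      let item_parts := (pos_pieces.drop 2).foldl
        (fun acc rest => acc ++ rest.2) ((((pos_pieces.drop 1).headI).2).drop 1)
      (some (PySem.Str.join " " (cds ++ [first_non_number_word])), PySem.Str.join " " item_parts)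
    else
      let item_parts := (pos_pieces.drop 1).foldl (fun acc rest => acc ++ rest.2) []
      (some (PySem.Str.join " " cds), PySem.Str.join " " item_parts)

-- ===== PORT B =====
def process_pos_alt (array : List (String × String)) : Option String × String :=
  if array.length = 1 then
    (none, (array.headI).1)
  else if array.length = 2 then
    (some (array.headI).1, ((array.drop 1).headI).1)
  else
    let pos0 := (array.headI).2
    let L := (array.takeWhile (fun p => p.2 == pos0)).length
    let words := array.map Prod.fst
    let cds := words.take L
    let rest := words.drop L
    if MAPPER.contains rest.headI then
      (some (PySem.Str.join " " (cds ++ [rest.headI])), PySem.Str.join " " (rest.drop 1))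
    else
      (some (PySem.Str.join " " cds), PySem.Str.join " " rest)

-- ===== PRECONDITION & SPEC =====
-- Pre_ excludes exactly the inputs where Python A raises IndexError: the empty list, and
-- lists of length ≥ 3 whose tokens all share one position (order_array then yields a single
-- group and pos_pieces[1] does not exist).  Python B raises there too.
def Pre_process_pos (array : List (String × String)) : Prop :=
  array ≠ [] ∧ (3 ≤ array.length → ∃ x ∈ array, x.2 ≠ (array.headI).2)
instance (array : List (String × String)) : Decidable (Pre_process_pos array) := by
  unfold Pre_process_pos; infer_instance

def pvWitness_process_pos : (List (String × String)) :=
  [("a", "1"), ("b", "1"), ("c", "2")]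

def Spec_process_pos (array : List (String × String)) (out : Option String × String) : Prop :=
  out = process_pos_alt array
instance (array : List (String × String)) (out : Option String × String) :
    Decidable (Spec_process_pos array out) := by unfold Spec_process_pos; infer_instance

-- ===== CLAIM (what is proved, stated in full; the proofs are below) =====
def Claim_equal_process_pos : Prop :=
  ∀ (array : List (String × String)), Dom_process_pos array → Pre_process_pos array →
    Spec_process_pos array (process_pos array)

-- ===== LEMMAS AND PROOFS =====

-- the recursive specification of A's grouping loop, starting mid-run with current
-- position p and already-collected words ws
def groupsFrom (p : String) (ws : List String) :
    List (String × String) → List (Option String × List String)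
  | [] => [(some p, ws)]
  | y :: ys =>
      if y.2 = p then groupsFrom p (ws ++ [y.1]) ys
      else (some p, ws) :: groupsFrom y.2 [y.1] ys

-- the loop body of order_array's foldl, named for the invariant lemma
def pvStep (st : List (Option String × List String) × (Option String × List String))
    (inst : String × String) :
    List (Option String × List String) × (Option String × List String) :=
  let holder := st.1
  let temp := st.2
  if some inst.2 ≠ temp.1 then
    (holder ++ [temp], (some inst.2, [inst.1]))
  else
    (holder, (temp.1, temp.2 ++ [inst.1]))

theorem order_loop_spec (xs : List (String × String)) :
    ∀ (holder : List (Option String × List String)) (p : String) (ws : List String),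
    (xs.foldl pvStep (holder, (some p, ws))).1 ++ [(xs.foldl pvStep (holder, (some p, ws))).2]
      = holder ++ groupsFrom p ws xs := by
  induction xs with
  | nil => intro holder p ws; simp [groupsFrom]
  | cons y ys ih =>
      intro holder p ws
      simp only [List.foldl_cons, groupsFrom]
      by_cases h : y.2 = p
      · have hstep : pvStep (holder, (some p, ws)) y = (holder, (some p, ws ++ [y.1])) := by
          simp [pvStep, h]
        rw [hstep, if_pos h]
        exact ih holder p (ws ++ [y.1])
      · have hstep : pvStep (holder, (some p, ws)) y
            = (holder ++ [(some p, ws)], (some y.2, [y.1])) := by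
          simp [pvStep, h]
        rw [hstep, if_neg h, ih (holder ++ [(some p, ws)]) y.2 [y.1]]
        simp

theorem order_array_eq (a : String × String) (rest : List (String × String)) :
    order_array (a :: rest) = groupsFrom a.2 [a.1] rest := by
  unfold order_array
  have hfun : (fun (st : List (Option String × List String) × (Option String × List String)) inst =>
      let holder := st.1
      let temp := st.2
      if some inst.2 ≠ temp.1 then
        (holder ++ [temp], (some inst.2, [inst.1]))
      else
        (holder, (temp.1, temp.2 ++ [inst.1]))) = pvStep := rfl
  simp only [hfun, List.foldl_cons]
  have h0 : pvStep ([], (none, [])) a = ([((none : Option String), ([] : List String))], (some a.2, [a.1])) := by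
    simp [pvStep]
  rw [h0]
  have := order_loop_spec rest [((none : Option String), ([] : List String))] a.2 [a.1]
  rw [this]
  simp

theorem groupsFrom_flatten (xs : List (String × String)) :
    ∀ (p : String) (ws : List String),
    ((groupsFrom p ws xs).map (·.2)).flatten = ws ++ xs.map Prod.fst := by
  induction xs with
  | nil => intro p ws; simp [groupsFrom]
  | cons y ys ih =>
      intro p ws
      simp only [groupsFrom]
      split_ifs with h
      · rw [ih]; simp
      · simp only [List.map_cons, List.flatten_cons, ih]; simp

theorem groupsFrom_head (xs : List (String × String)) :
    ∀ (p : String) (ws : List String),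
    ((groupsFrom p ws xs).headI).2 = ws ++ (xs.takeWhile (fun y => y.2 == p)).map Prod.fst := by
  induction xs with
  | nil => intro p ws; simp [groupsFrom]
  | cons y ys ih =>
      intro p ws
      by_cases h : y.2 = p
      · have hb : (y.2 == p) = true := by simpa using h
        simp only [groupsFrom, List.takeWhile, if_pos h, hb]
        rw [ih]
        simp
      · have hb : (y.2 == p) = false := by simpa using h
        simp [groupsFrom, List.takeWhile, if_neg h, hb]

theorem groupsFrom_tail_flatten (xs : List (String × String)) :
    ∀ (p : String) (ws : List String),
    (((groupsFrom p ws xs).drop 1).map (·.2)).flatten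
      = (xs.dropWhile (fun y => y.2 == p)).map Prod.fst := by
  induction xs with
  | nil => intro p ws; simp [groupsFrom]
  | cons y ys ih =>
      intro p ws
      by_cases h : y.2 = p
      · have hb : (y.2 == p) = true := by simpa using h
        simp only [groupsFrom, List.dropWhile, if_pos h, hb]
        exact ih p (ws ++ [y.1])
      · have hb : (y.2 == p) = false := by simpa using h
        simp only [groupsFrom, List.dropWhile, if_neg h, hb, List.drop_succ_cons,
          List.drop_zero]
        rw [groupsFrom_flatten]
        simp

theorem foldl_append_flatten (l : List (Option String × List String)) :
    ∀ (s : List String), l.foldl (fun acc rest => acc ++ rest.2) s = s ++ (l.map (·.2)).flatten := by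
  induction l with
  | nil => intro s; simp
  | cons g gs ih => intro s; simp only [List.foldl_cons, List.map_cons, List.flatten_cons, ih]; simp

theorem take_length_takeWhile {α : Type} (p : α → Bool) (xs : List α) :
    xs.take (xs.takeWhile p).length = xs.takeWhile p := by
  induction xs with
  | nil => simp
  | cons y ys ih =>
      simp only [List.takeWhile]
      cases h : p y <;> simp [ih]

theorem drop_length_takeWhile {α : Type} (p : α → Bool) (xs : List α) :
    xs.drop (xs.takeWhile p).length = xs.dropWhile p := by
  induction xs with
  | nil => simp
  | cons y ys ih =>
      simp only [List.takeWhile, List.dropWhile]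
      cases h : p y <;> simp [ih]

-- ===== VERDICT (by name: the statement is the Claim_ definition above) =====
theorem process_pos_spec : Claim_equal_process_pos := by
  intro array _hdom _hpre
  unfold Spec_process_pos process_pos process_pos_alt
  by_cases h1 : array.length = 1
  · simp [h1]
  · by_cases h2 : array.length = 2
    · simp [h2]
    · simp only [if_neg h1, if_neg h2]
      cases array with
      | nil => rfl
      | cons a rest =>
          rw [order_array_eq]
          have hmap : ∀ w, MAPPER.contains w = false := by
            intro w; simp [MAPPER]
          simp only [hmap, Bool.false_eq_true, ite_false]
          have hhead := groupsFrom_head rest a.2 [a.1]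
          have htail := groupsFrom_tail_flatten rest a.2 [a.1]
          rw [foldl_append_flatten, List.nil_append, htail, hhead]
          have hpos : ((a :: rest).headI).2 = a.2 := rfl
          have htw : (a :: rest).takeWhile (fun p => p.2 == a.2)
              = a :: rest.takeWhile (fun p => p.2 == a.2) := by
            simp [List.takeWhile]
          simp only [hpos, htw, List.length_cons, List.map_cons,
            List.take_succ_cons, List.drop_succ_cons]
          rw [← List.map_take, ← List.map_drop, take_length_takeWhile, drop_length_takeWhile]
          simp
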